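-- pv_equiv track=rewrite | github.com/YashB63/GFG-Daily-Questions | Day 585/Form coils in a matrix/form_coils_in_a_matrix.py | formCoils
-- ===== SOURCE A (Python) =====
-- def formCoils(n):
--     m = 8*n*n
--     coil1 = [0]*m
--     coil1[0] = 8*n*n + 2*n
--     curr = coil1[0]
--     nflg = 1
--     step = 2
--
--     index = 1
--
--     while index < m:
--         for i in range(step):
--             curr = curr - 4*n*nflg
--             coil1[index] = curr
--             index += 1
--             if index >= m:
--                 break
--
--         if index >= m:
--             break
--
--         for i in range(step):
--             curr = curr + nflg
--             coil1[index] = curr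
--             index += 1
--             if index >= m:
--                 break
--
--         nflg = (-nflg)
--         step += 2
--
--     coil2 = [0]*m
--     i = 0
--
--     for i in range(m):
--         coil2[i] = 16*n*n + 1 - coil1[i]
--
--     return [coil1,coil2]
-- ===== SOURCE B (Python) =====
-- def formCoils(n):
--     m = 8*n*n
--     v0 = 8*n*n + 2*n
--     coil1 = [v0]
--     r = 0
--     while len(coil1) < m:
--         s = 1 if r % 2 == 0 else -1
--         step = 2*r + 2
--         # baseline value entering round r, computed in closed form from r alone
--         base = v0 + (1 - 4*n) * ((r + 1) if r % 2 == 1 else -r)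
--         coil1 += [base - 4*n*s*q for q in range(1, step + 1)]
--         coil1 += [base - 4*n*s*step + s*q for q in range(1, step + 1)]
--         r += 1
--     coil1 = coil1[:m]
--     coil2 = [16*n*n + 1 - x for x in coil1]
--     return [coil1, coil2]
-- ===== Notes on version B (the rewrite author's own statement) =====
-- stated objective: alternative
-- what changed: B replaces A's single sequential accumulator (curr updated element by element with index/break bookkeeping) by per-round closed-form generation: the baseline value entering round r is computed directly as v0+(1-4n)*((r+1) if r odd else -r), each round's 2*step values are emitted by arithmetic comprehensions from that baseline, and the concatenation is truncated to m; no emitted value is derived from the previously emitted one.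
-- outside the precondition, e.g. on formCoils(0): A raises IndexError, B returns [[], []]
import Mathlib
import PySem

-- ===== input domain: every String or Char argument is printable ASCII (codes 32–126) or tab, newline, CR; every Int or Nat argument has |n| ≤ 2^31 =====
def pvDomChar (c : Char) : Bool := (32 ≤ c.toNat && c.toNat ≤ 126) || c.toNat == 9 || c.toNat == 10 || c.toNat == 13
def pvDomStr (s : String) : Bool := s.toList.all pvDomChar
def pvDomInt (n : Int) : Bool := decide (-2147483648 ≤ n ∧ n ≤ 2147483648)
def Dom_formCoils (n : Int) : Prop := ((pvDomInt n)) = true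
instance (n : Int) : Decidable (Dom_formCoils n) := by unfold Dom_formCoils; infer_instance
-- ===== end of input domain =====

-- B replaces A's sequential accumulator with per-round closed-form generation: the baseline
-- entering round r is a formula in r, each round's values are arithmetic comprehensions from it.

-- ===== PORT A =====
-- one Python inner `for i in range(k)` loop: append curr+delta, bump index, break once index ≥ m
def innerA (delta m : Int) (k : Nat) (acc : List Int) (curr index : Int) : List Int × Int × Int :=
  match k with
  | 0 => (acc, curr, index)
  | Nat.succ k =>
    let curr' := curr + delta
    let acc' := acc ++ [curr']
    let index' := index + 1
    if m ≤ index' then (acc', curr', index')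
    else innerA delta m k acc' curr' index'

theorem innerA_idx_le (delta m : Int) (k : Nat) (acc : List Int) (curr index : Int) :
    index ≤ (innerA delta m k acc curr index).2.2 := by
  induction k generalizing acc curr index with
  | zero => simp [innerA]
  | succ k ih =>
    simp only [innerA]
    split
    · simp
    · exact le_trans (by omega) (ih _ _ _)

theorem innerA_idx_lt (delta m : Int) (k : Nat) (hk : k ≠ 0) (acc : List Int) (curr index : Int) :
    index < (innerA delta m k acc curr index).2.2 := by
  cases k with
  | zero => exact absurd rfl hk
  | succ k =>
    simp only [innerA]
    split
    · simp
    · exact lt_of_lt_of_le (by omega) (innerA_idx_le _ _ _ _ _ _)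

-- the Python `while index < m` loop (the step = 0 guard is a totality guard only; step starts at 2)
def outerA (n m : Int) (acc : List Int) (curr index nflg : Int) (step : Nat) : List Int :=
  if _h0 : step = 0 then acc
  else if _hm : index < m then
    let r1 := innerA (-(4*n*nflg)) m step acc curr index
    if m ≤ r1.2.2 then r1.1
    else
      let r2 := innerA nflg m step r1.1 r1.2.1 r1.2.2
      if _h2 : m ≤ r2.2.2 then r2.1
      else outerA n m r2.1 r2.2.1 r2.2.2 (-nflg) (step + 2)
  else acc
termination_by (m - index).toNat
decreasing_by
  have h1 := innerA_idx_le (-(4*n*nflg)) m step acc curr index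
  have h2 := innerA_idx_lt nflg m step _h0
    (innerA (-(4*n*nflg)) m step acc curr index).1
    (innerA (-(4*n*nflg)) m step acc curr index).2.1
    (innerA (-(4*n*nflg)) m step acc curr index).2.2
  omega

def formCoils (n : Int) : List (List Int) :=
  let m := 8*n*n
  -- coil1[0] = 8*n*n + 2*n raises IndexError when m = 0; Pre_ excludes n = 0
  let start := 8*n*n + 2*n
  let coil1 := outerA n m [start] start 1 1 2
  let coil2 := coil1.map (fun x => 16*n*n + 1 - x)
  [coil1, coil2]

-- ===== PORT B =====
-- B's while loop: per round r emit both blocks from the closed-form baseline, stop once the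
-- list has at least m elements ([base - 4*n*s*q for q in range(1, step+1)] is ported as a map
-- over List.range step with q+1, the same values in the same order)
-- B's round-r closed-form baseline and sign (the two inline formulas of Source B's loop body)
def sgnB (r : Nat) : Int := if r % 2 = 0 then 1 else -1
def baseB (n v0 : Int) (r : Nat) : Int :=
  v0 + (1 - 4*n) * (if r % 2 = 1 then (r : Int) + 1 else -(r : Int))

def bRounds (n m v0 : Int) (acc : List Int) (r : Nat) : List Int :=
  if _h : (acc.length : Int) < m then
    let s : Int := sgnB r
    let step := 2*r + 2
    let base := baseB n v0 r
    bRounds n m v0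
      (acc ++ ((List.range step).map fun (q : Nat) => base - 4*n*s*((q : Int) + 1))
        ++ ((List.range step).map fun (q : Nat) => base - 4*n*s*(step : Int) + s*((q : Int) + 1)))
      (r + 1)
  else acc
termination_by (m - acc.length).toNat
decreasing_by simp; omega

def formCoils_alt (n : Int) : List (List Int) :=
  let m := 8*n*n
  let v0 := 8*n*n + 2*n
  let coil1 := (bRounds n m v0 [v0] 0).take m.toNat
  let coil2 := coil1.map (fun x => 16*n*n + 1 - x)
  [coil1, coil2]

-- ===== PRECONDITION & SPEC =====
-- Pre_ excludes exactly the inputs where the Python A raises: n = 0 (IndexError assigning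
-- coil1[0] on []) and 8*n*n > 2^63-1, where CPython's `[0]*m` raises OverflowError because the
-- list length m exceeds sys.maxsize.
def Pre_formCoils (n : Int) : Prop := n ≠ 0 ∧ 8*n*n ≤ 9223372036854775807
instance (n : Int) : Decidable (Pre_formCoils n) := by unfold Pre_formCoils; infer_instance
def pvWitness_formCoils : Int := (1)

def Spec_formCoils (n : Int) (out : List (List Int)) : Prop := out = formCoils_alt n
instance (n : Int) (out : List (List Int)) : Decidable (Spec_formCoils n out) := by
  unfold Spec_formCoils; infer_instance

-- ===== CLAIM (what is proved, stated in full; the proofs are below) =====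
def Claim_equal_formCoils : Prop :=
  ∀ (n : Int), Dom_formCoils n → Pre_formCoils n → Spec_formCoils n (formCoils n)
-- ===== LEMMAS AND PROOFS =====

-- k successive values curr + d, curr + 2d, …, curr + k·d
def svals (curr d : Int) (k : Nat) : List Int :=
  match k with
  | 0 => []
  | Nat.succ k => (curr + d) :: svals (curr + d) d k

-- common reference: the untruncated per-round values, cut to exactly `fuel` elements
def exactRounds (n : Int) (fuel : Nat) (curr nflg : Int) (step : Nat) : List Int :=
  if step = 0 then []
  else if fuel = 0 then []
  else
    let a := -(4*n*nflg)
    let c1 := curr + step * a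
    (svals curr a step ++ svals c1 nflg step).take fuel
      ++ exactRounds n (fuel - 2*step) (c1 + step * nflg) (-nflg) (step + 2)
termination_by fuel
decreasing_by omega

theorem svals_length (curr d : Int) (k : Nat) : (svals curr d k).length = k := by
  induction k generalizing curr with
  | zero => rfl
  | succ k ih => simp [svals, ih]

theorem svals_take (curr d : Int) (k j : Nat) :
    (svals curr d k).take j = svals curr d (min j k) := by
  induction k generalizing curr j with
  | zero => simp [svals]
  | succ k ih =>
    cases j with
    | zero => simp [svals]
    | succ j => simp [svals, ih, Nat.succ_min_succ]

-- closed form of svals as a map over range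
theorem svals_eq_map (curr d : Int) (k : Nat) :
    svals curr d k = (List.range k).map (fun (q : Nat) => curr + ((q : Int) + 1) * d) := by
  induction k generalizing curr with
  | zero => rfl
  | succ k ih =>
    rw [List.range_succ_eq_map, List.map_cons, List.map_map]
    simp only [svals, ih]
    refine List.cons_eq_cons.mpr ⟨by push_cast; ring, ?_⟩
    apply List.map_congr_left
    intro q _
    simp only [Function.comp_apply]
    push_cast; ring

-- A's inner loop writes exactly min k (m-index) values
theorem innerA_eq (d m : Int) (k : Nat) (acc : List Int) (curr index : Int)
    (h : index < m) :
    innerA d m k acc curr index =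
      (acc ++ svals curr d (min k (m - index).toNat),
        curr + (min k (m - index).toNat) * d,
        index + (min k (m - index).toNat)) := by
  induction k generalizing acc curr index with
  | zero => simp [innerA, svals]
  | succ k ih =>
    simp only [innerA]
    split
    · have ht : min (k+1) (m - index).toNat = 1 := by omega
      rw [ht]
      simp only [svals, Prod.mk.injEq]
      refine ⟨by simp, by push_cast; ring, by push_cast; ring⟩
    · have hlt : index + 1 < m := by omega
      rw [ih _ _ _ hlt]
      have ht : min (k+1) (m - index).toNat = min k (m - (index+1)).toNat + 1 := by omega
      rw [ht]
      simp only [svals, Prod.mk.injEq]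
      refine ⟨by simp, by push_cast; ring, by push_cast; ring⟩

-- A's while loop appends exactly the reference values
theorem outerA_eq (n m : Int) (acc : List Int) (curr index nflg : Int) (step : Nat) :
    outerA n m acc curr index nflg step
      = acc ++ exactRounds n (m - index).toNat curr nflg step := by
  fun_induction outerA n m acc curr index nflg step with
  | case1 acc curr index nflg => simp [exactRounds]
  | case2 acc curr index nflg step h0 hm r1 h1 =>
    have hr1 : r1 = (acc ++ svals curr (-(4*n*nflg)) (min step (m - index).toNat),
        curr + (min step (m - index).toNat) * (-(4*n*nflg)),
        index + (min step (m - index).toNat)) := by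
      rw [show r1 = innerA (-(4*n*nflg)) m step acc curr index from rfl,
        innerA_eq _ _ _ _ _ _ hm]
    rw [hr1] at h1 ⊢
    simp only at h1 ⊢
    have hfz : (m - index).toNat ≠ 0 := by omega
    have ht : min step (m - index).toNat = (m - index).toNat := by omega
    rw [ht]
    rw [exactRounds]
    simp only [if_neg h0, if_neg hfz]
    rw [List.take_append, svals_take, svals_length]
    have h1' : (m - index).toNat - step = 0 := by omega
    have h2' : (m - index).toNat - 2*step = 0 := by omega
    rw [h1', h2', Nat.min_eq_left (by omega)]
    rw [exactRounds]
    simp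
  | case3 acc curr index nflg step h0 hm r1 h1 r2 h2 =>
    have hr1 : r1 = (acc ++ svals curr (-(4*n*nflg)) (min step (m - index).toNat),
        curr + (min step (m - index).toNat) * (-(4*n*nflg)),
        index + (min step (m - index).toNat)) := by
      rw [show r1 = innerA (-(4*n*nflg)) m step acc curr index from rfl,
        innerA_eq _ _ _ _ _ _ hm]
    rw [hr1] at h1
    simp only at h1
    have ht1 : min step (m - index).toNat = step := by omega
    rw [ht1] at hr1 h1
    have hlt2 : index + (step:Int) < m := by omega
    have e2 : r2 = innerA nflg m step r1.1 r1.2.1 r1.2.2 := rfl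
    rw [hr1] at e2
    simp only at e2
    rw [innerA_eq _ _ _ _ _ _ hlt2] at e2
    rw [e2] at h2
    simp only at h2
    have ht2 : min step (m - (index + (step:Int))).toNat = (m - (index + (step:Int))).toNat := by
      omega
    rw [ht2] at e2
    rw [e2]
    simp only
    have hfz : (m - index).toNat ≠ 0 := by omega
    rw [exactRounds]
    simp only [if_neg h0, if_neg hfz]
    rw [List.take_append]
    rw [List.take_of_length_le (by rw [svals_length]; omega)]
    rw [svals_length, svals_take]
    have hsub : (m - index).toNat - step = (m - (index + (step:Int))).toNat := by omega
    have hle2 : (m - (index + (step:Int))).toNat ≤ step := by omega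
    have h2' : (m - index).toNat - 2*step = 0 := by omega
    rw [hsub, Nat.min_eq_left hle2, h2']
    rw [exactRounds]
    simp [List.append_assoc]
  | case4 acc curr index nflg step h0 hm r1 h1 r2 h2 ih =>
    have hr1 : r1 = (acc ++ svals curr (-(4*n*nflg)) (min step (m - index).toNat),
        curr + (min step (m - index).toNat) * (-(4*n*nflg)),
        index + (min step (m - index).toNat)) := by
      rw [show r1 = innerA (-(4*n*nflg)) m step acc curr index from rfl,
        innerA_eq _ _ _ _ _ _ hm]
    rw [hr1] at h1
    simp only at h1
    have ht1 : min step (m - index).toNat = step := by omega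
    rw [ht1] at hr1 h1
    have hlt2 : index + (step:Int) < m := by omega
    have e2 : r2 = innerA nflg m step r1.1 r1.2.1 r1.2.2 := rfl
    rw [hr1] at e2
    simp only at e2
    rw [innerA_eq _ _ _ _ _ _ hlt2] at e2
    rw [e2] at h2
    simp only at h2
    have ht2 : min step (m - (index + (step:Int))).toNat = step := by omega
    rw [ht2] at e2
    rw [e2] at ih ⊢
    simp only at ih ⊢
    rw [ih]
    have hfz : (m - index).toNat ≠ 0 := by omega
    conv_rhs => rw [exactRounds]
    simp only [if_neg h0, if_neg hfz]
    rw [List.take_of_length_le (by simp [svals_length]; omega)]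
    have hfe : (m - (index + (step:Int) + (step:Int))).toNat = (m - index).toNat - 2*step := by
      omega
    rw [hfe]
    simp [List.append_assoc]
  | case5 acc curr index nflg step h0 hm =>
    have : (m - index).toNat = 0 := by omega
    rw [this, exactRounds]
    simp

theorem sgnB_succ (r : Nat) : sgnB (r + 1) = -sgnB r := by
  unfold sgnB
  split_ifs <;> omega

-- the accumulator A carries equals B's closed-form baseline, round over round
theorem baseB_succ (n v0 : Int) (r : Nat) :
    baseB n v0 (r + 1)
      = (baseB n v0 r + (2*r+2 : Nat) * (-(4*n*sgnB r))) + (2*r+2 : Nat) * sgnB r := by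
  unfold baseB sgnB
  split_ifs <;> try (exfalso; omega)
  all_goals (push_cast; ring)

-- B's loop, truncated to m, yields the same reference values as A's loop
theorem bRounds_spec (n m v0 : Int) (acc : List Int) (r : Nat) :
    (bRounds n m v0 acc r).take m.toNat
      = acc.take m.toNat
        ++ exactRounds n (m.toNat - acc.length) (baseB n v0 r) (sgnB r) (2*r + 2) := by
  fun_induction bRounds n m v0 acc r with
  | case1 acc r hlt s step base ih =>
    simp only [s, step, base] at ih ⊢
    rw [ih]
    have hm1 : ((List.range (2*r+2)).map fun (q : Nat) =>
          baseB n v0 r - 4*n*(sgnB r)*((q : Int) + 1))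
        = svals (baseB n v0 r) (-(4*n*(sgnB r))) (2*r+2) := by
      rw [svals_eq_map]
      apply List.map_congr_left; intro q _; ring
    have hm2 : ((List.range (2*r+2)).map fun (q : Nat) =>
          baseB n v0 r - 4*n*(sgnB r)*((2*r+2 : Nat) : Int) + (sgnB r)*((q : Int) + 1))
        = svals (baseB n v0 r + (2*r+2 : Nat) * (-(4*n*(sgnB r)))) (sgnB r) (2*r+2) := by
      rw [svals_eq_map]
      apply List.map_congr_left; intro q _; push_cast; ring
    rw [hm1, hm2]
    have hacc : acc.take m.toNat = acc := List.take_of_length_le (by omega)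
    rw [hacc]
    conv_rhs => rw [exactRounds]
    have hfz : m.toNat - acc.length ≠ 0 := by omega
    rw [if_neg (by omega : ¬ (2*r+2 = 0)), if_neg hfz]
    simp only
    rw [List.append_assoc, List.take_append, hacc]
    have hfuel : m.toNat - (acc ++ (svals (baseB n v0 r) (-(4*n*(sgnB r))) (2*r+2)
          ++ svals (baseB n v0 r + (2*r+2 : Nat) * (-(4*n*(sgnB r)))) (sgnB r) (2*r+2))).length
        = m.toNat - acc.length - 2*(2*r+2) := by
      simp [svals_length]; omega
    rw [hfuel, baseB_succ, sgnB_succ, show 2*(r+1)+2 = 2*r+2+2 from by ring,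
      List.append_assoc]
  | case2 acc r hge =>
    have hfz : m.toNat - acc.length = 0 := by omega
    rw [hfz, exactRounds]
    simp

-- ===== VERDICT (by name: the statement is the Claim_ definition above) =====
theorem formCoils_spec : Claim_equal_formCoils := by
  intro n _ hpre
  obtain ⟨hn, -⟩ := hpre
  unfold Spec_formCoils formCoils formCoils_alt
  simp only []
  have hm1 : (1:Int) ≤ 8*n*n := by nlinarith [mul_self_pos.mpr hn]
  rw [outerA_eq, bRounds_spec]
  have h0 : baseB n (8*n*n + 2*n) 0 = 8*n*n + 2*n := by simp [baseB]
  have hsg : sgnB 0 = 1 := rfl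
  rw [h0, hsg]
  have ht : ([8*n*n + 2*n] : List Int).take (8*n*n).toNat = [8*n*n + 2*n] := by
    apply List.take_of_length_le; simp; omega
  rw [ht]
  have hf : (8*n*n).toNat - ([8*n*n + 2*n] : List Int).length = (8*n*n - 1).toNat := by
    simp only [List.length_cons, List.length_nil]; omega
  rw [hf]
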